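-- pv_equiv track=rewrite | github.com/cleverlyblue0009/sandisk | backend/youtube_classifier.py | extract_video_title
-- ===== SOURCE A (Python) =====
-- _BROWSER_TITLE_SUFFIXES = {
--     "google chrome",
--     "chrome",
--     "microsoft edge",
--     "edge",
--     "mozilla firefox",
--     "firefox",
-- }
--
-- _IDLE_YOUTUBE_TITLES = {
--     "youtube",
--     "home - youtube",
--     "youtube home",
--     "home",
-- }
--
-- def extract_video_title(window_title: str) -> str:
--     title = (window_title or "").strip()
--     lowered = title.lower()
--     if "youtube" not in lowered:
--         return ""
--     if lowered in _IDLE_YOUTUBE_TITLES: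
--         return ""
--
--     segments = [segment.strip() for segment in title.split(" - ") if segment.strip()]
--     if not segments:
--         return ""
--
--     filtered = [segment for segment in segments if segment.lower() not in _BROWSER_TITLE_SUFFIXES]
--     if not filtered:
--         return ""
--
--     yt_index = next((idx for idx, part in enumerate(filtered) if "youtube" in part.lower()), -1)
--     if yt_index == 0:
--         return ""
--     if yt_index > 0:
--         candidate = filtered[0]
--     else:
--         candidate = filtered[0]
--
--     candidate = candidate.strip()
--     if not candidate:
--         return ""
--     if candidate.lower() in _IDLE_YOUTUBE_TITLES:
--         return ""
--     if len(candidate) < 4: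
--         return ""
--     return candidate
-- ===== SOURCE B (Python) =====
-- _BROWSER_TITLE_SUFFIXES = {
--     "google chrome",
--     "chrome",
--     "microsoft edge",
--     "edge",
--     "mozilla firefox",
--     "firefox",
-- }
--
-- _IDLE_YOUTUBE_TITLES = {
--     "youtube",
--     "home - youtube",
--     "youtube home",
--     "home",
-- }
--
-- def _first_segment(s):
--     # cursor scan over the raw string: no split, no intermediate lists
--     while True:
--         i = s.find(" - ")
--         head = s if i < 0 else s[:i]
--         seg = head.strip()
--         if seg and seg.lower() not in _BROWSER_TITLE_SUFFIXES:
--             return seg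
--         if i < 0:
--             return None
--         s = s[i + 3:]
--
-- def extract_video_title(window_title: str) -> str:
--     title = (window_title or "").strip()
--     lowered = title.lower()
--     if "youtube" not in lowered:
--         return ""
--     if lowered in _IDLE_YOUTUBE_TITLES:
--         return ""
--     candidate = _first_segment(title)
--     if candidate is None:
--         return ""
--     low = candidate.lower()
--     if "youtube" in low:
--         return ""
--     if low in _IDLE_YOUTUBE_TITLES:
--         return ""
--     if len(candidate) < 4:
--         return ""
--     return candidate
-- ===== Notes on version B (the rewrite author's own statement) =====
-- stated objective: alternative
-- what changed: B never builds the split/filter lists at all: a cursor scan over the raw string uses str.find with the dash separator and slicing to examine one segment at a time until the first surviving one, then applies the validity checks to it; A builds two intermediate lists plus an enumerate/next index scan.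
import Mathlib
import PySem

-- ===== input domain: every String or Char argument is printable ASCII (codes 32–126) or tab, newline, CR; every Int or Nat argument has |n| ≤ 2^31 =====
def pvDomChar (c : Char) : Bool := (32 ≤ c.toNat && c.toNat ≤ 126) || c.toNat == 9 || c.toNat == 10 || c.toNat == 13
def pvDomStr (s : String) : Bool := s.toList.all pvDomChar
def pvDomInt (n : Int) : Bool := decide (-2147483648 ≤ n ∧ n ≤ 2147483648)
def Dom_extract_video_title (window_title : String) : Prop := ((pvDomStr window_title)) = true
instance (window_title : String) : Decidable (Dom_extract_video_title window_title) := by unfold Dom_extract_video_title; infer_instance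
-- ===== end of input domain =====

-- B replaces A's split/filter/enumerate list pipeline with a cursor scan over the raw
-- string using find(" - ") and slicing (objective: alternative). Same return values.

-- ===== PORT A =====
def pvBrowserSuffixes : List String :=
  ["google chrome", "chrome", "microsoft edge", "edge", "mozilla firefox", "firefox"]

def pvIdleTitles : List String :=
  ["youtube", "home - youtube", "youtube home", "home"]

-- next((idx for idx, part in enumerate(filtered) if "youtube" in part.lower()), -1)
def pvYtIndex (filtered : List String) : Int :=
  match (PySem.List.enumerate filtered 0).find?
      (fun p => PySem.Str.isIn "youtube" (PySem.Str.lower p.2)) with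
  | some p => p.1
  | none => -1

def extract_video_title (window_title : String) : String :=
  let title := PySem.Str.strip window_title
  let lowered := PySem.Str.lower title
  if !PySem.Str.isIn "youtube" lowered then "" else
  if pvIdleTitles.contains lowered then "" else
  -- title.split(" - "): sep ≠ "", so split? is always some
  let segments := ((PySem.Str.split? title " - ").getD []).filterMap (fun seg =>
      let s := PySem.Str.strip seg
      if s = "" then none else some s)
  if segments.isEmpty then "" else
  let filtered := segments.filter (fun s => !pvBrowserSuffixes.contains (PySem.Str.lower s))
  if filtered.isEmpty then "" else
  let ytIndex : Int := pvYtIndex filtered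
  if ytIndex = 0 then "" else
  -- filtered[0] is safe here (filtered nonempty), transliterated as headD
  let candidate := if ytIndex > 0 then filtered.headD "" else filtered.headD ""
  let candidate2 := PySem.Str.strip candidate
  if candidate2 = "" then "" else
  if pvIdleTitles.contains (PySem.Str.lower candidate2) then "" else
  if PySem.Str.len candidate2 < 4 then "" else candidate2

-- ===== PORT B =====
def pvSepC : List Char := [' ', '-', ' ']

def pvBrowserSuffixesC : List (List Char) := pvBrowserSuffixes.map String.toList

def pvIdleTitlesC : List (List Char) := pvIdleTitles.map String.toList

-- termination fact the port cites: a found separator ends at least 3 chars before the end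
theorem pv_find_add3_le (s : List Char) (h : 0 ≤ PySem.Chars.find s pvSepC) :
    (PySem.Chars.find s pvSepC).toNat + 3 ≤ s.length := by
  obtain ⟨hpre, -⟩ := PySem.Chars.find_spec h
  have h1 := hpre.length_le
  rw [List.length_drop] at h1
  have h2 : pvSepC.length = 3 := rfl
  omega

-- the while-loop of _first_segment: cursor scan with find and slices
def pvFirstSeg (s : List Char) : Option (List Char) :=
  let i := PySem.Chars.find s pvSepC
  let seg := PySem.Chars.strip (if i < 0 then s else PySem.List.slice s none (some i))
  if seg ≠ [] ∧ pvBrowserSuffixesC.contains (PySem.Chars.lower seg) = false then some seg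
  else if h : i < 0 then none
  else pvFirstSeg (PySem.List.slice s (some (i + 3)) none)
termination_by s.length
decreasing_by
  have h0 : (0 : Int) ≤ PySem.Chars.find s pvSepC := by omega
  have h3 := pv_find_add3_le s h0
  rw [PySem.List.slice_from s (by omega : (0:Int) ≤ PySem.Chars.find s pvSepC + 3)]
  have : (PySem.Chars.find s pvSepC + 3).toNat = (PySem.Chars.find s pvSepC).toNat + 3 := by omega
  simp [this]
  omega

def extract_video_title_alt (window_title : String) : String :=
  let title := PySem.Str.strip window_title
  let lowered := PySem.Str.lower title
  if !PySem.Str.isIn "youtube" lowered then "" else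
  if pvIdleTitles.contains lowered then "" else
  match pvFirstSeg title.toList with
  | none => ""
  | some cand =>
    let low := PySem.Chars.lower cand
    if PySem.Chars.isIn "youtube".toList low then "" else
    if pvIdleTitlesC.contains low then "" else
    if cand.length < 4 then "" else String.ofList cand

-- ===== PRECONDITION & SPEC =====
-- Pre_ excludes nothing (A returns a string on every input); the example titles it
-- names only document the interesting input shape (a real video segment before the
-- youtube/browser segments).
def Pre_extract_video_title (window_title : String) : Prop :=
  window_title ∈ ["Cool Cat Video - YouTube - Google Chrome",
    "Breaking News Tonight - YouTube - Mozilla Firefox",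
    "Lo-fi Beats To Relax - YouTube"] ∨
  window_title ∉ ["Cool Cat Video - YouTube - Google Chrome",
    "Breaking News Tonight - YouTube - Mozilla Firefox",
    "Lo-fi Beats To Relax - YouTube"]
instance (window_title : String) : Decidable (Pre_extract_video_title window_title) := by unfold Pre_extract_video_title; infer_instance
def pvWitness_extract_video_title : String := "Cool Cat Video - YouTube - Google Chrome"

def Spec_extract_video_title (window_title : String) (out : String) : Prop := out = extract_video_title_alt window_title
instance (window_title : String) (out : String) : Decidable (Spec_extract_video_title window_title out) := by unfold Spec_extract_video_title; infer_instance

-- ===== CLAIM (what is proved, stated in full; the proofs are below) =====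
def Claim_equal_extract_video_title : Prop := ∀ (window_title : String), Dom_extract_video_title window_title → Pre_extract_video_title window_title → Spec_extract_video_title window_title (extract_video_title window_title)

-- ===== LEMMAS AND PROOFS =====

theorem pv_dropWhile_prefix_eq (p : Char → Bool) (x m : List Char) (hx : x <+: m)
    (hm : List.dropWhile p m = m) : List.dropWhile p x = x := by
  cases x with
  | nil => simp
  | cons c t =>
    obtain ⟨r, rfl⟩ := hx
    rw [List.cons_append, List.dropWhile_cons] at hm
    by_cases hc : p c = true
    · exfalso
      have hle := List.length_dropWhile_le p (t ++ r)
      rw [if_pos hc] at hm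
      rw [hm] at hle
      simp at hle
    · simp [hc]

theorem pv_chars_strip_strip (l : List Char) :
    PySem.Chars.strip (PySem.Chars.strip l) = PySem.Chars.strip l := by
  show PySem.Chars.rstrip (PySem.Chars.lstrip (PySem.Chars.rstrip (PySem.Chars.lstrip l)))
      = PySem.Chars.rstrip (PySem.Chars.lstrip l)
  have hl : PySem.Chars.lstrip (PySem.Chars.rstrip (PySem.Chars.lstrip l))
      = PySem.Chars.rstrip (PySem.Chars.lstrip l) := by
    apply pv_dropWhile_prefix_eq
    · have h : List.dropWhile PySem.Chars.isspace (PySem.Chars.lstrip l).reverse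
          <:+ (PySem.Chars.lstrip l).reverse := List.dropWhile_suffix _
      simpa [PySem.Chars.rstrip] using List.reverse_prefix.mpr h
    · exact List.dropWhile_idempotent _ l
  rw [hl]
  simp [PySem.Chars.rstrip, List.dropWhile_idempotent]

theorem pv_str_strip_strip (s : String) :
    PySem.Str.strip (PySem.Str.strip s) = PySem.Str.strip s := by
  apply String.toList_injective
  simpa using pv_chars_strip_strip s.toList

-- A-side characterisation helper (proof-only): first surviving segment of a String list
def pvFirstKeepS : List String → Option String
  | [] => none
  | seg :: rest =>
    let s := PySem.Str.strip seg
    if s ≠ "" && !pvBrowserSuffixes.contains (PySem.Str.lower s) then some s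
    else pvFirstKeepS rest

-- char-level twin
def pvFirstKeepC : List (List Char) → Option (List Char)
  | [] => none
  | seg :: rest =>
    let s := PySem.Chars.strip seg
    if s ≠ [] ∧ pvBrowserSuffixesC.contains (PySem.Chars.lower s) = false then some s
    else pvFirstKeepC rest

theorem pv_firstKeep_eq (segs : List String) :
    pvFirstKeepS segs =
      ((segs.filterMap (fun seg =>
          let s := PySem.Str.strip seg
          if s = "" then none else some s)).filter
        (fun s => !pvBrowserSuffixes.contains (PySem.Str.lower s))).head? := by
  induction segs with
  | nil => rfl
  | cons seg rest ih =>
    by_cases he : PySem.Str.strip seg = ""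
    · have hL : pvFirstKeepS (seg :: rest) = pvFirstKeepS rest := by
        simp [pvFirstKeepS, he]
      rw [hL, List.filterMap_cons_none (by simp [he]), ih]
    · rw [List.filterMap_cons_some (b := PySem.Str.strip seg) (by simp [he])]
      by_cases hb : pvBrowserSuffixes.contains (PySem.Str.lower (PySem.Str.strip seg)) = true
      · have hb' : PySem.Str.lower (PySem.Str.strip seg) ∈ pvBrowserSuffixes := by
          simpa using hb
        have hL : pvFirstKeepS (seg :: rest) = pvFirstKeepS rest := by
          simp [pvFirstKeepS, hb']
        rw [hL, List.filter_cons_of_neg (by simp [hb']), ih]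
      · have hb' : PySem.Str.lower (PySem.Str.strip seg) ∉ pvBrowserSuffixes := by
          simpa using hb
        have hL : pvFirstKeepS (seg :: rest) = some (PySem.Str.strip seg) := by
          simp [pvFirstKeepS, he, hb']
        rw [hL, List.filter_cons_of_pos (by simp [hb']), List.head?_cons]

theorem pv_contains_toList (l : List String) (s : String) :
    (l.map String.toList).contains s.toList = l.contains s := by
  by_cases h : s ∈ l
  · have : s.toList ∈ l.map String.toList := List.mem_map_of_mem h
    simp [h, this]
  · have : s.toList ∉ l.map String.toList := by
      intro hm
      obtain ⟨t, ht, hts⟩ := List.mem_map.mp hm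
      exact h (by rwa [String.toList_inj.mp hts] at ht)
    simp [h, this]

theorem pv_firstKeepS_eq_C (l : List String) :
    pvFirstKeepS l = (pvFirstKeepC (l.map String.toList)).map String.ofList := by
  induction l with
  | nil => rfl
  | cons seg rest ih =>
    simp only [pvFirstKeepS, pvFirstKeepC, List.map_cons]
    have hstrip : PySem.Chars.strip seg.toList = (PySem.Str.strip seg).toList :=
      (PySem.Str.toList_strip seg).symm
    rw [hstrip]
    have hne : ((PySem.Str.strip seg).toList ≠ []) ↔ (PySem.Str.strip seg ≠ "") := by
      constructor
      · intro h hc; simp [hc] at h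
      · intro h hc; exact h (String.toList_injective (by simp [hc]))
    have hcont : pvBrowserSuffixesC.contains (PySem.Chars.lower (PySem.Str.strip seg).toList)
        = pvBrowserSuffixes.contains (PySem.Str.lower (PySem.Str.strip seg)) := by
      rw [← PySem.Str.toList_lower]
      exact pv_contains_toList _ _
    by_cases h1 : PySem.Str.strip seg ≠ "" ∧ pvBrowserSuffixes.contains (PySem.Str.lower (PySem.Str.strip seg)) = false
    · rw [if_pos (by rw [h1.2]; simp [h1.1]), if_pos ⟨hne.mpr h1.1, by rw [hcont]; exact h1.2⟩]
      simp only [Option.map_some, String.ofList_toList]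
    · rw [if_neg (by intro hc; exact h1 ⟨by simpa using (Bool.and_eq_true _ _ |>.mp hc).1, by simpa using (Bool.and_eq_true _ _ |>.mp hc).2⟩),
         if_neg (by intro hc; exact h1 ⟨hne.mp hc.1, by rw [← hcont]; exact hc.2⟩), ih]

theorem pv_mem_segments_strip (segs : List String) (c : String)
    (hc : c ∈ segs.filterMap (fun seg =>
        let s := PySem.Str.strip seg
        if s = "" then none else some s)) :
    c ≠ "" ∧ PySem.Str.strip c = c := by
  rw [List.mem_filterMap] at hc
  obtain ⟨seg, _, hf⟩ := hc
  by_cases he : PySem.Str.strip seg = ""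
  · simp [he] at hf
  · simp [he] at hf
    subst hf
    exact ⟨he, pv_str_strip_strip seg⟩

theorem pv_find_enumerate_ne_zero (pred : Int × String → Bool) (rest : List String)
    (s : Int) (hs : 1 ≤ s) :
    (match List.find? pred (PySem.List.enumerate rest s) with
      | some p => p.1
      | none => (-1 : Int)) ≠ 0 := by
  cases hfind : List.find? pred (PySem.List.enumerate rest s) with
  | none => simp
  | some p =>
    have hp : p ∈ PySem.List.enumerate rest s := List.mem_of_find?_eq_some hfind
    rw [PySem.List.mem_enumerate_iff] at hp
    obtain ⟨k, hk, rfl⟩ := hp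
    show s + (k : Int) ≠ 0
    omega

-- ---- characterisation of Chars.splitOn at sep = " - " ----

def pvMySplit : List Char → List (List Char)
  | [] => [[]]
  | c :: rest =>
    if pvSepC.isPrefixOf (c :: rest) then [] :: pvMySplit (List.drop 3 (c :: rest))
    else (c :: (pvMySplit rest).headD []) :: (pvMySplit rest).tail
termination_by l => l.length
decreasing_by
  all_goals simp

theorem pvMySplit_ne_nil (l : List Char) : pvMySplit l ≠ [] := by
  cases l with
  | nil => simp [pvMySplit]
  | cons c rest =>
    rw [pvMySplit]
    split <;> simp

theorem pv_headD_tail (l : List (List Char)) (h : l ≠ []) : l.headD [] :: l.tail = l := by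
  cases l with
  | nil => exact absurd rfl h
  | cons a t => simp

theorem pv_go_eq (fuel : ℕ) : ∀ (l cur : List Char) (acc : List (List Char)),
    l.length < fuel →
    PySem.Chars.splitOn.go pvSepC fuel l cur acc
      = acc.reverse ++ (cur.reverse ++ (pvMySplit l).headD []) :: (pvMySplit l).tail := by
  induction fuel with
  | zero => intro l cur acc h; omega
  | succ f ih =>
    intro l cur acc h
    cases l with
    | nil =>
      simp [PySem.Chars.splitOn.go, pvMySplit]
    | cons c rest =>
      rw [PySem.Chars.splitOn.go]
      rw [pvMySplit]
      by_cases hp : pvSepC.isPrefixOf (c :: rest) = true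
      · rw [if_pos hp, if_pos hp]
        have h3 : pvSepC.length = 3 := rfl
        rw [h3]
        have hlen : (List.drop 3 (c :: rest)).length < f := by
          simp at h ⊢; omega
        rw [ih _ _ _ hlen]
        simp only [List.reverse_nil, List.nil_append]
        rw [pv_headD_tail _ (pvMySplit_ne_nil _)]
        simp only [List.headD_cons, List.tail_cons, List.reverse_cons]
        simp
      · rw [if_neg hp, if_neg hp]
        have hlen : rest.length < f := by simp at h; omega
        rw [ih _ _ _ hlen]
        cases hms : pvMySplit rest with
        | nil => exact absurd hms (pvMySplit_ne_nil rest)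
        | cons a t => simp

theorem pv_splitOn_eq (s : List Char) :
    PySem.Chars.splitOn s pvSepC = pvMySplit s := by
  show PySem.Chars.splitOn.go pvSepC (s.length + 1) s [] [] = _
  rw [pv_go_eq (s.length + 1) s [] [] (by omega)]
  simp only [List.reverse_nil, List.nil_append]
  exact pv_headD_tail _ (pvMySplit_ne_nil _)

theorem pv_find_neg_iff (s : List Char) :
    PySem.Chars.find s pvSepC < 0 ↔ ¬ pvSepC <:+: s := by
  have h1 := PySem.Chars.neg_one_le_find s pvSepC
  have h2 := PySem.Chars.find_eq_neg_one_iff s pvSepC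
  constructor
  · intro h; exact h2.mp (by omega)
  · intro h; rw [← h2] at h; omega

theorem pv_mySplit_of_find_neg (s : List Char) (h : PySem.Chars.find s pvSepC < 0) :
    pvMySplit s = [s] := by
  induction s with
  | nil => rw [pvMySplit]
  | cons c rest ih =>
    have hinf := (pv_find_neg_iff _).mp h
    have hp : ¬ pvSepC.isPrefixOf (c :: rest) = true := by
      intro hc
      exact hinf (List.IsPrefix.isInfix (List.isPrefixOf_iff_prefix.mp hc))
    have hrest : PySem.Chars.find rest pvSepC < 0 := by
      rw [pv_find_neg_iff]
      intro hc
      exact hinf (hc.trans (List.suffix_cons c rest).isInfix)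
    rw [pvMySplit, if_neg hp, ih hrest]
    simp

theorem pv_mySplit_of_find_nonneg (s : List Char) (h : 0 ≤ PySem.Chars.find s pvSepC) :
    pvMySplit s = s.take (PySem.Chars.find s pvSepC).toNat ::
      pvMySplit (s.drop ((PySem.Chars.find s pvSepC).toNat + 3)) := by
  induction s with
  | nil =>
    exfalso
    have h2 := PySem.Chars.find_eq_neg_one_iff [] pvSepC
    have hni : ¬ pvSepC <:+: ([] : List Char) := by
      intro hc
      have := List.eq_nil_of_infix_nil hc
      simp [pvSepC] at this
    have := h2.mpr hni
    omega
  | cons c rest ih =>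
    obtain ⟨hpre, hmin⟩ := PySem.Chars.find_spec h
    set n := (PySem.Chars.find (c :: rest) pvSepC).toNat with hn
    by_cases h0 : n = 0
    · have hp : pvSepC.isPrefixOf (c :: rest) = true := by
        rw [List.isPrefixOf_iff_prefix]
        simpa [h0] using hpre
      rw [pvMySplit, if_pos hp, h0]
      simp
    · have hnp : ¬ pvSepC.isPrefixOf (c :: rest) = true := by
        intro hc
        exact hmin 0 (by omega) (by simpa using List.isPrefixOf_iff_prefix.mp hc)
    -- find on rest sits exactly one position earlier
      have hdrop : rest.drop (n - 1) = (c :: rest).drop n := by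
        obtain ⟨k, hk⟩ := Nat.exists_eq_succ_of_ne_zero h0
        simp [hk]
      have hpre' : pvSepC <+: rest.drop (n - 1) := by rw [hdrop]; exact hpre
      have hrest_ge : 0 ≤ PySem.Chars.find rest pvSepC := by
        have hne : PySem.Chars.find rest pvSepC ≠ -1 := by
          rw [PySem.Chars.find_ne_neg_one_iff]
          exact hpre'.isInfix.trans (List.drop_suffix _ _).isInfix
        have := PySem.Chars.neg_one_le_find rest pvSepC
        omega
      obtain ⟨hpre2, hmin2⟩ := PySem.Chars.find_spec hrest_ge
      set m := (PySem.Chars.find rest pvSepC).toNat with hm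
      have hm_eq : m = n - 1 := by
        by_contra hnem
        rcases Nat.lt_or_ge m (n - 1) with hlt | hge
        · exact hmin (m + 1) (by omega) (by simpa using hpre2)
        · exact hmin2 (n - 1) (by omega) hpre'
      rw [pvMySplit, if_neg hnp, ih hrest_ge, hm_eq]
      have h1 : c :: rest.take (n - 1) = (c :: rest).take n := by
        obtain ⟨k, hk⟩ := Nat.exists_eq_succ_of_ne_zero h0
        simp [hk]
      have h2 : rest.drop (n - 1 + 3) = (c :: rest).drop (n + 3) := by
        obtain ⟨k, hk⟩ := Nat.exists_eq_succ_of_ne_zero h0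
        simp [hk]
      simp [h1, h2]

theorem pv_firstSeg_eq (s : List Char) : pvFirstSeg s = pvFirstKeepC (pvMySplit s) := by
  generalize hN : s.length = N
  induction N using Nat.strong_induction_on generalizing s with
  | _ N ih =>
  rcases lt_or_ge (PySem.Chars.find s pvSepC) 0 with hneg | hpos
  · rw [pv_mySplit_of_find_neg s hneg, pvFirstSeg]
    simp only [if_pos hneg, pvFirstKeepC]
    split
    · rfl
    · rfl
  · have h3 := pv_find_add3_le s hpos
    rw [pv_mySplit_of_find_nonneg s hpos, pvFirstSeg]
    have hslice : PySem.List.slice s none (some (PySem.Chars.find s pvSepC))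
        = s.take (PySem.Chars.find s pvSepC).toNat := PySem.List.slice_to s hpos
    have hnlt : ¬ PySem.Chars.find s pvSepC < 0 := by omega
    simp only [if_neg hnlt, hslice, pvFirstKeepC]
    split
    · rfl
    · have hdrop : PySem.List.slice s (some (PySem.Chars.find s pvSepC + 3)) none
          = s.drop ((PySem.Chars.find s pvSepC).toNat + 3) := by
        rw [PySem.List.slice_from s (by omega)]
        congr 1
        omega
      rw [hdrop]
      exact ih (s.drop ((PySem.Chars.find s pvSepC).toNat + 3)).length
        (by subst hN; simp; omega) _ rfl

-- ===== VERDICT (by name: the statement is the Claim_ definition above) =====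
theorem extract_video_title_spec : Claim_equal_extract_video_title := by
  intro w _ _
  unfold Spec_extract_video_title
  simp only [extract_video_title, extract_video_title_alt]
  by_cases h1 : (!PySem.Str.isIn "youtube" (PySem.Str.lower (PySem.Str.strip w))) = true
  · rw [if_pos h1, if_pos h1]
  rw [if_neg h1, if_neg h1]
  by_cases h2 : pvIdleTitles.contains (PySem.Str.lower (PySem.Str.strip w)) = true
  · rw [if_pos h2, if_pos h2]
  rw [if_neg h2, if_neg h2]
  have hK := pv_firstKeep_eq ((PySem.Str.split? (PySem.Str.strip w) " - ").getD [])
  have hmapC : ((PySem.Str.split? (PySem.Str.strip w) " - ").getD []).map String.toList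
      = PySem.Chars.splitOn (PySem.Str.strip w).toList pvSepC := by
    have hb := PySem.Str.split?_map (PySem.Str.strip w) " - "
    have hsep : (" - " : String).toList = pvSepC := by decide
    rw [hsep] at hb
    have hsome : PySem.Chars.split? (PySem.Str.strip w).toList pvSepC
        = some (PySem.Chars.splitOn (PySem.Str.strip w).toList pvSepC) := by
      simp [PySem.Chars.split?, pvSepC]
    rw [hsome] at hb
    cases hsp : PySem.Str.split? (PySem.Str.strip w) " - " with
    | none => rw [hsp] at hb; simp at hb
    | some L =>
      rw [hsp] at hb
      simp at hb
      simpa [hsp] using hb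
  have hfs : (pvFirstSeg (PySem.Str.strip w).toList).map String.ofList
      = ((((PySem.Str.split? (PySem.Str.strip w) " - ").getD []).filterMap (fun seg =>
          let s := PySem.Str.strip seg
          if s = "" then none else some s)).filter
        (fun s => !pvBrowserSuffixes.contains (PySem.Str.lower s))).head? := by
    rw [pv_firstSeg_eq, ← pv_splitOn_eq, ← hmapC, ← pv_firstKeepS_eq_C, hK]
  set segs := (PySem.Str.split? (PySem.Str.strip w) " - ").getD [] with hsegs
  set segments := segs.filterMap (fun seg =>
      let s := PySem.Str.strip seg
      if s = "" then none else some s) with hsegments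
  set filtered := segments.filter
      (fun s => !pvBrowserSuffixes.contains (PySem.Str.lower s)) with hfiltered
  cases hf : filtered with
  | nil =>
    rw [hf] at hfs
    have hnone : pvFirstSeg (PySem.Str.strip w).toList = none := by
      cases h : pvFirstSeg (PySem.Str.strip w).toList with
      | none => rfl
      | some a => rw [h] at hfs; simp at hfs
    rw [hnone]
    by_cases hse : segments.isEmpty = true
    · rw [if_pos hse]
    · rw [if_neg hse, if_pos (by simp : ([] : List String).isEmpty = true)]
  | cons c rest =>
    rw [hf, List.head?_cons] at hfs
    obtain ⟨a, ha, hac⟩ := Option.map_eq_some_iff.mp hfs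
    have hat : a = c.toList := by rw [← hac, String.toList_ofList]
    subst hat
    rw [ha]
    have hcseg : c ∈ segments := by
      have hcf : c ∈ filtered := by rw [hf]; exact List.mem_cons_self
      exact List.mem_of_mem_filter hcf
    obtain ⟨hcne, hcstrip⟩ := pv_mem_segments_strip segs c hcseg
    have hsegne : ¬(segments.isEmpty = true) := by
      simp only [List.isEmpty_iff]
      intro h; rw [h] at hcseg; exact absurd hcseg List.not_mem_nil
    rw [if_neg hsegne, if_neg (by simp : ¬(((c :: rest) : List String).isEmpty = true))]
    have hyt_eq : PySem.Chars.isIn "youtube".toList (PySem.Chars.lower c.toList)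
        = PySem.Str.isIn "youtube" (PySem.Str.lower c) := by
      rw [PySem.Str.isIn_eq, PySem.Str.toList_lower]
    have hidle_eq : pvIdleTitlesC.contains (PySem.Chars.lower c.toList)
        = pvIdleTitles.contains (PySem.Str.lower c) := by
      rw [← PySem.Str.toList_lower]
      exact pv_contains_toList _ _
    by_cases hy : PySem.Str.isIn "youtube" (PySem.Str.lower c) = true
    · -- first kept segment itself mentions youtube: ytIndex = 0, both sides return ""
      rw [pvYtIndex, PySem.List.enumerate_cons,
        List.find?_cons_of_pos (p := fun (p : Int × String) => PySem.Str.isIn "youtube" (PySem.Str.lower p.2))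
          (by simpa using hy)]
      rw [if_pos rfl]
      simp only [hyt_eq, hy, if_pos]
    · have hyt : pvYtIndex (c :: rest) ≠ 0 := by
        rw [pvYtIndex, PySem.List.enumerate_cons,
          List.find?_cons_of_neg (p := fun (p : Int × String) => PySem.Str.isIn "youtube" (PySem.Str.lower p.2))
            (by simpa using hy)]
        exact pv_find_enumerate_ne_zero _ rest (0 + 1) (by norm_num)
      rw [if_neg hyt, ite_self, List.headD_cons, hcstrip, if_neg hcne]
      simp only [hyt_eq, hy, if_neg, Bool.false_eq_true, not_false_iff]
      rw [hidle_eq]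
      by_cases hid : pvIdleTitles.contains (PySem.Str.lower c) = true
      · rw [if_pos hid, if_pos hid]
      rw [if_neg hid, if_neg hid]
      have hlen_eq : (PySem.Str.len c < 4) ↔ (c.toList.length < 4) := by
        rw [PySem.Str.len_eq]
        omega
      by_cases hl : PySem.Str.len c < 4
      · rw [if_pos hl, if_pos (hlen_eq.mp hl)]
      · rw [if_neg hl, if_neg (fun hc => hl (hlen_eq.mpr hc))]
        exact String.ofList_toList.symm
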